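-- pv_equiv track=rewrite | github.com/s1nthagent/openclaw-memory | scripts/memory-consolidate.py | format_recent_history
-- ===== SOURCE A (Python) =====
-- def format_recent_history(events):
--     """Format events into RECENT HISTORY section"""
--     if not events:
--         return ""
--
--     # Group by date
--     by_date = {}
--     for event in events:
--         date = event['date']
--         if date not in by_date:
--             by_date[date] = []
--         by_date[date].append(event)
--
--     # Format
--     lines = []
--     for date in sorted(by_date.keys(), reverse=True):
--         lines.append(f"\n### {date}")
--         for event in by_date[date]:
--             lines.append(f"- {event['text']}")
--
--     return '\n'.join(lines)
-- ===== SOURCE B (Python) =====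
-- def format_recent_history(events):
--     """Format events into RECENT HISTORY section"""
--     if not events:
--         return ""
--     # One stable sort of the flat event list (descending by date keeps
--     # within-date events in original order), then a single pass that emits
--     # a header whenever the date changes.
--     lines = []
--     prev = None
--     for event in sorted(events, key=lambda e: e['date'], reverse=True):
--         d = event['date']
--         if d != prev:
--             lines.append(f"\n### {d}")
--         lines.append(f"- {event['text']}")
--         prev = d
--     return '\n'.join(lines)
-- ===== Notes on version B (the rewrite author's own statement) =====
-- stated objective: alternative
-- what changed: Replaces the grouping dict plus separate key-sort with one stable sort of the flat event list (descending by date) followed by a single header-on-date-change pass.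
import Mathlib
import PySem

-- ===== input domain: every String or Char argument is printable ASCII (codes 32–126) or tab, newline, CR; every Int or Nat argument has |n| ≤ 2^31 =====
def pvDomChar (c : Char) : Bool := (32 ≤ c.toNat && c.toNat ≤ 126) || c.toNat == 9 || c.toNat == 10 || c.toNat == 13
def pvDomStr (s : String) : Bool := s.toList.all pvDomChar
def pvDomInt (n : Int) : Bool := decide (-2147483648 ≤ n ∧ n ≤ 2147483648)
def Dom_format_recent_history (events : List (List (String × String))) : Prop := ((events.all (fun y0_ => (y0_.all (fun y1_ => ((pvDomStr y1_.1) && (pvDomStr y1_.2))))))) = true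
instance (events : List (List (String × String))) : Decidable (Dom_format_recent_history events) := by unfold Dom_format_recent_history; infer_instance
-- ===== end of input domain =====

-- B replaces A's grouping dict + separate key-sort by one stable sort of the
-- flat event list (descending by date) and a single header-on-date-change pass.

-- shared helper: event['k'] on the assoc-list dict (first match; Pre_ guarantees presence)
def evGet (e : List (String × String)) (k : String) : String :=
  (PySem.Dict.mk e).getD k ""

-- ===== PORT A =====
def format_recent_history (events : List (List (String × String))) : String :=
  if events = [] then ""
  else
    let by_date : PySem.Dict String (List (List (String × String))) :=
      events.foldl (fun d ev => d.modify (evGet ev "date") [] (fun g => g ++ [ev])) PySem.Dict.empty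
    let lines : List String :=
      (PySem.List.sorted by_date.keys (fun x => x) true).foldl
        (fun lines date =>
          (by_date.getD date []).foldl (fun lines ev => lines ++ ["- " ++ evGet ev "text"])
            (lines ++ ["\n### " ++ date]))
        []
    PySem.Str.join "\n" lines

-- ===== PORT B =====
def bStep (st : List String × Option String) (ev : List (String × String)) :
    List String × Option String :=
  let d := evGet ev "date"
  let lines := if st.2 = some d then st.1 else st.1 ++ ["\n### " ++ d]
  (lines ++ ["- " ++ evGet ev "text"], some d)

def format_recent_history_alt (events : List (List (String × String))) : String :=
  if events = [] then ""
  else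
    let sortedEv := PySem.List.sorted events (fun e => evGet e "date") true
    let res := sortedEv.foldl bStep ([], none)
    PySem.Str.join "\n" res.1

-- ===== PRECONDITION & SPEC =====
-- Pre_ excludes exactly the events missing a 'date' or 'text' key, on which A raises KeyError.
def Pre_format_recent_history (events : List (List (String × String))) : Prop :=
  ∀ ev ∈ events, (PySem.Dict.mk ev).contains "date" = true ∧ (PySem.Dict.mk ev).contains "text" = true
instance (events : List (List (String × String))) : Decidable (Pre_format_recent_history events) := by
  unfold Pre_format_recent_history; infer_instance
def pvWitness_format_recent_history : (List (List (String × String))) :=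
  [[("date", "2024-01-02"), ("text", "hi")], [("date", "2024-01-01"), ("text", "bye")]]

def Spec_format_recent_history (events : List (List (String × String))) (out : String) : Prop := out = format_recent_history_alt events
instance (events : List (List (String × String))) (out : String) : Decidable (Spec_format_recent_history events out) := by unfold Spec_format_recent_history; infer_instance

-- ===== CLAIM (what is proved, stated in full; the proofs are below) =====
def Claim_equal_format_recent_history : Prop := ∀ (events : List (List (String × String))), Dom_format_recent_history events → Pre_format_recent_history events → Spec_format_recent_history events (format_recent_history events)

-- ===== LEMMAS AND PROOFS =====

-- abbreviations used only by the proofs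
def evKey (e : List (String × String)) : String := evGet e "date"
def evFmt (e : List (String × String)) : String := "- " ++ evGet e "text"
def evHdr (d : String) : String := "\n### " ++ d
def grp (events : List (List (String × String))) (d : String) : List (List (String × String)) :=
  events.filter (fun e => evKey e == d)

-- sorted(xs, key, reverse=True) appended from the right is one insertBy
theorem sorted_rev_append_singleton {α κ : Type} [LinearOrder κ] (xs : List α) (x : α) (key : α → κ) :
    PySem.List.sorted (xs ++ [x]) key true =
      PySem.List.insertBy (fun a b => decide (key b < key a)) x (PySem.List.sorted xs key true) := by
  rw [PySem.List.sorted_rev_eq_foldl_insertBy, PySem.List.sorted_rev_eq_foldl_insertBy,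
    List.foldl_append]
  rfl

-- filtering through insertBy into a descending list
theorem filter_insertBy {α κ : Type} [LinearOrder κ] (key : α → κ) (x : α) (c : κ) :
    ∀ ys : List α, ys.Pairwise (fun a b => key b ≤ key a) →
    (PySem.List.insertBy (fun a b => decide (key b < key a)) x ys).filter (fun e => key e == c) =
      (if key x = c then ys.filter (fun e => key e == c) ++ [x]
       else ys.filter (fun e => key e == c)) := by
  intro ys
  induction ys with
  | nil =>
    intro _
    by_cases h : key x = c <;> simp [PySem.List.insertBy, List.filter, h]
  | cons y ys ih =>
    intro hp
    rw [List.pairwise_cons] at hp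
    obtain ⟨hy, hp'⟩ := hp
    by_cases hlt : key y < key x
    · have hstep : PySem.List.insertBy (fun a b => decide (key b < key a)) x (y :: ys) =
          x :: y :: ys := by
        simp [PySem.List.insertBy, hlt]
      rw [hstep]
      by_cases hc : key x = c
      · have hnil : (y :: ys).filter (fun e => key e == c) = [] := by
          apply List.filter_eq_nil_iff.mpr
          intro e he
          simp only [beq_iff_eq]
          intro heq
          have hle : key e ≤ key y := by
            rcases List.mem_cons.mp he with rfl | h
            · exact le_refl _
            · exact hy e h
          have : key e < key x := lt_of_le_of_lt hle hlt
          rw [heq, hc] at this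
          exact absurd this (lt_irrefl c)
        simp [hnil, hc]
      · have hxc : (key x == c) = false := by simpa using hc
        simp [List.filter_cons, hxc, hc]
    · have hstep : PySem.List.insertBy (fun a b => decide (key b < key a)) x (y :: ys) =
          y :: PySem.List.insertBy (fun a b => decide (key b < key a)) x ys := by
        simp [PySem.List.insertBy, hlt]
      rw [hstep]
      simp only [List.filter_cons]
      rw [ih hp']
      by_cases hc : key x = c <;> by_cases hyc : (key y == c) = true <;>
        simp [hc, hyc]


-- stability of the descending sort: per-key filters are preserved
theorem filter_sorted_rev {α κ : Type} [LinearOrder κ] (key : α → κ) (xs : List α) (c : κ) :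
    (PySem.List.sorted xs key true).filter (fun e => key e == c) =
      xs.filter (fun e => key e == c) := by
  induction xs using List.reverseRecOn with
  | nil => simp [PySem.List.sorted]
  | append_singleton xs x ih =>
    rw [sorted_rev_append_singleton,
      filter_insertBy key x c _ (PySem.List.sorted_pairwise_rev xs key), ih, List.filter_append]
    by_cases hc : key x = c <;> simp [hc]

-- uniqueness: two descending lists with identical per-key filters are equal
theorem eq_of_pairwise_of_filters {α κ : Type} [LinearOrder κ] (key : α → κ) :
    ∀ (ys zs : List α), ys.Pairwise (fun a b => key b ≤ key a) →
      zs.Pairwise (fun a b => key b ≤ key a) →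
      (∀ c, ys.filter (fun e => key e == c) = zs.filter (fun e => key e == c)) →
      ys = zs := by
  intro ys
  induction ys with
  | nil =>
    intro zs _ _ h
    cases zs with
    | nil => rfl
    | cons z zs =>
      have := h (key z)
      simp at this
  | cons y ys ih =>
    intro zs hpy hpz h
    cases zs with
    | nil =>
      have := h (key y)
      simp at this
    | cons z zs =>
      rw [List.pairwise_cons] at hpy hpz
      have hyz : key y = key z := by
        have hy_mem : y ∈ (z :: zs).filter (fun e => key e == (key y)) := by
          rw [← h (key y)]; simp
        have hz_mem : z ∈ (y :: ys).filter (fun e => key e == (key z)) := by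
          rw [h (key z)]; simp
        have h1 : key y ≤ key z := by
          rcases List.mem_cons.mp (List.mem_filter.mp hy_mem).1 with rfl | hm
          · exact le_refl _
          · exact hpz.1 y hm
        have h2 : key z ≤ key y := by
          rcases List.mem_cons.mp (List.mem_filter.mp hz_mem).1 with rfl | hm
          · exact le_refl _
          · exact hpy.1 z hm
        exact le_antisymm h1 h2
      have h1 := h (key y)
      rw [List.filter_cons, List.filter_cons] at h1
      have hy' : (key y == key y) = true := by simp
      have hz : (key z == key y) = true := by simp [hyz]
      simp only [hy', hz, if_true, List.cons.injEq] at h1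
      obtain ⟨hhead, htail⟩ := h1
      subst hhead
      have hall : ∀ c, ys.filter (fun e => key e == c) = zs.filter (fun e => key e == c) := by
        intro c
        by_cases hc : key y = c
        · subst hc; exact htail
        · have := h c
          have hyc : (key y == c) = false := by simpa using hc
          simpa [List.filter_cons, hyc] using this
      exact congrArg (y :: ·) (ih zs hpy.2 hpz.2 hall)

-- every member of a group has that group's date
theorem grp_key (events : List (List (String × String))) (d : String) :
    ∀ e ∈ grp events d, evKey e = d := by
  intro e he
  have := (List.mem_filter.mp he).2
  simpa using this

-- flatMap over nodup dates of "only the c-group survives"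
theorem flatMap_ite_single (events : List (List (String × String))) (c : String) :
    ∀ ds : List String, ds.Nodup →
      ds.flatMap (fun d => if d = c then grp events c else []) =
        (if c ∈ ds then grp events c else []) := by
  intro ds
  induction ds with
  | nil => simp
  | cons d ds ih =>
    intro hnd
    rw [List.nodup_cons] at hnd
    rw [List.flatMap_cons, ih hnd.2]
    by_cases hdc : d = c
    · subst hdc
      simp [hnd.1]
    · simp [hdc, List.mem_cons, Ne.symm hdc]

-- the descending sort is the concatenation of the per-date groups
theorem sorted_rev_eq_flatMap (events : List (List (String × String))) :
    PySem.List.sorted events evKey true =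
      (PySem.List.sorted (PySem.Set.ofList (events.map evKey)) (fun x => x) true).flatMap
        (grp events) := by
  have hds_perm := PySem.List.sorted_perm (PySem.Set.ofList (events.map evKey)) (fun x : String => x) true
  have hds_nodup : (PySem.List.sorted (PySem.Set.ofList (events.map evKey)) (fun x : String => x) true).Nodup :=
    hds_perm.symm.nodup (PySem.Set.nodup_ofList _)
  have hds_le := PySem.List.sorted_pairwise_rev (PySem.Set.ofList (events.map evKey)) (fun x : String => x)
  have hds_lt : (PySem.List.sorted (PySem.Set.ofList (events.map evKey)) (fun x : String => x) true).Pairwise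
      (fun a b => b < a) := by
    have := (hds_le.and hds_nodup)
    exact this.imp (fun h => lt_of_le_of_ne h.1 (Ne.symm h.2))
  have hmem : ∀ d, d ∈ PySem.List.sorted (PySem.Set.ofList (events.map evKey)) (fun x : String => x) true ↔
      d ∈ events.map evKey := by
    intro d
    rw [PySem.List.mem_sorted, PySem.Set.mem_ofList]
  apply eq_of_pairwise_of_filters evKey
  · exact PySem.List.sorted_pairwise_rev events evKey
  · rw [List.pairwise_flatMap]
    constructor
    · intro d _
      apply List.pairwise_of_forall_mem_list
      intro a ha b hb
      rw [grp_key events d a ha, grp_key events d b hb]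
    · exact hds_lt.imp (fun {d1 d2} h x hx y hy => by
        rw [grp_key events _ x hx, grp_key events _ y hy]; exact le_of_lt h)
  · intro c
    rw [filter_sorted_rev, List.filter_flatMap]
    have hgf : ∀ d, (grp events d).filter (fun e => evKey e == c) =
        (if d = c then grp events c else []) := by
      intro d
      by_cases hdc : d = c
      · subst hdc
        rw [if_pos rfl]
        apply List.filter_eq_self.mpr
        intro e he
        simpa using grp_key events d e he
      · rw [if_neg hdc]
        apply List.filter_eq_nil_iff.mpr
        intro e he
        have := grp_key events d e he
        simp [this, hdc]
    simp only [hgf]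
    rw [flatMap_ite_single events c _ hds_nodup]
    by_cases hc : c ∈ events.map evKey
    · rw [if_pos ((hmem c).mpr hc)]
      rfl
    · rw [if_neg (fun h => hc ((hmem c).mp h))]
      apply List.filter_eq_nil_iff.mpr
      intro e he
      simp only [beq_iff_eq]
      intro heq
      exact hc (List.mem_map.mpr ⟨e, he, heq⟩)

-- A's grouping dict: keys and lookups
theorem a_keys (events : List (List (String × String))) :
    (events.foldl (fun d ev => d.modify (evGet ev "date") [] (fun g => g ++ [ev]))
        PySem.Dict.empty).keys = PySem.Set.ofList (events.map evKey) := by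
  rw [PySem.Dict.keys_foldl_modify_key events (fun ev => evGet ev "date")
    ([] : List (List (String × String))) (fun _ ev => (fun g => g ++ [ev])) PySem.Dict.empty]
  rfl

theorem a_getD (events : List (List (String × String))) (c : String) :
    (events.foldl (fun d ev => d.modify (evGet ev "date") [] (fun g => g ++ [ev]))
        PySem.Dict.empty).getD c [] = grp events c := by
  have h := PySem.Dict.getD_foldl_modify_append
    (events.map (fun ev => (evGet ev "date", ev))) PySem.Dict.empty c
  rw [List.foldl_map] at h
  simpa [List.filter_map, List.map_map, Function.comp_def, List.map_id', PySem.Dict.getD_empty,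
    grp, evKey] using h

-- A's outer formatting loop, with the dict lookups resolved
theorem a_outer (events : List (List (String × String))) :
    ∀ (ds : List String) (acc : List String),
      ds.foldl (fun lines date =>
        ((events.foldl (fun d ev => d.modify (evGet ev "date") [] (fun g => g ++ [ev])) PySem.Dict.empty).getD date []).foldl
          (fun lines ev => lines ++ ["- " ++ evGet ev "text"]) (lines ++ ["\n### " ++ date])) acc
      = acc ++ ds.flatMap (fun d => evHdr d :: (grp events d).map evFmt) := by
  intro ds
  induction ds with
  | nil => intro acc; simp
  | cons d ds ih =>
    intro acc
    rw [List.foldl_cons, a_getD, PySem.List.foldl_append_singleton_eq_map, ih]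
    simp [evHdr, evFmt]

-- A's line list
theorem a_lines (events : List (List (String × String))) :
    (PySem.List.sorted
        (events.foldl (fun d ev => d.modify (evGet ev "date") [] (fun g => g ++ [ev])) PySem.Dict.empty).keys
        (fun x => x) true).foldl
      (fun lines date =>
        ((events.foldl (fun d ev => d.modify (evGet ev "date") [] (fun g => g ++ [ev])) PySem.Dict.empty).getD date []).foldl
          (fun lines ev => lines ++ ["- " ++ evGet ev "text"]) (lines ++ ["\n### " ++ date])) [] =
    (PySem.List.sorted (PySem.Set.ofList (events.map evKey)) (fun x => x) true).flatMap
      (fun d => evHdr d :: (grp events d).map evFmt) := by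
  rw [a_keys, a_outer]
  rw [List.nil_append]

-- B's fold inside one group (same date, header already emitted)
theorem b_fold_group (d : String) :
    ∀ (g : List (List (String × String))), (∀ e ∈ g, evKey e = d) →
      ∀ (acc : List String), g.foldl bStep (acc, some d) = (acc ++ g.map evFmt, some d) := by
  intro g
  induction g with
  | nil => intro _ acc; simp
  | cons e g' ih =>
    intro hd acc
    have he : evGet e "date" = d := hd e (List.mem_cons_self ..)
    have hstep : bStep (acc, some d) e = (acc ++ [evFmt e], some d) := by
      simp [bStep, he, evFmt]
    rw [List.foldl_cons, hstep, ih (fun e h => hd e (List.mem_cons_of_mem _ h)) (acc ++ [evFmt e])]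
    simp

-- B's fold over a concatenation of nonempty groups with distinct dates
theorem b_fold_groups (gr' : String → List (List (String × String))) :
    ∀ (ds : List String), ds.Nodup →
      (∀ d ∈ ds, gr' d ≠ []) →
      (∀ d ∈ ds, ∀ e ∈ gr' d, evKey e = d) →
      ∀ (prev : Option String), (∀ d ∈ ds, prev ≠ some d) →
      ∀ (acc : List String),
      ((ds.flatMap gr').foldl bStep (acc, prev)).1 =
        acc ++ ds.flatMap (fun d => evHdr d :: (gr' d).map evFmt) := by
  intro ds
  induction ds with
  | nil => intro _ _ _ prev _ acc; simp
  | cons d ds ih =>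
    intro hnd hne hkey prev hprev acc
    rw [List.nodup_cons] at hnd
    rw [List.flatMap_cons, List.foldl_append]
    obtain ⟨e, g', hge⟩ : ∃ e g', gr' d = e :: g' := by
      cases hg : gr' d with
      | nil => exact absurd hg (hne d (List.mem_cons_self ..))
      | cons e g' => exact ⟨e, g', rfl⟩
    have hkd : ∀ x ∈ gr' d, evKey x = d := hkey d (List.mem_cons_self ..)
    have he : evGet e "date" = d := hkd e (by rw [hge]; exact List.mem_cons_self ..)
    have hstep : bStep (acc, prev) e = (acc ++ ["\n### " ++ d] ++ [evFmt e], some d) := by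
      have hpd : prev ≠ some d := hprev d (List.mem_cons_self ..)
      simp [bStep, he, evFmt, hpd]
    rw [hge, List.foldl_cons, hstep,
      b_fold_group d g' (fun x hx => hkd x (by rw [hge]; exact List.mem_cons_of_mem _ hx)) _]
    rw [ih hnd.2 (fun x hx => hne x (List.mem_cons_of_mem _ hx))
      (fun x hx => hkey x (List.mem_cons_of_mem _ hx)) (some d)
      (fun x hx h => hnd.1 (by injection h with h'; rw [h']; exact hx)) _]
    simp [evHdr, hge]

-- ===== VERDICT (by name: the statement is the Claim_ definition above) =====
theorem format_recent_history_spec : Claim_equal_format_recent_history := by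
  intro events _ _
  unfold Spec_format_recent_history format_recent_history format_recent_history_alt
  by_cases hne : events = []
  · simp [hne]
  · simp only [if_neg hne]
    apply congrArg (PySem.Str.join "\n")
    rw [a_lines]
    have hkey_eta : (fun e => evGet e "date") = evKey := rfl
    rw [hkey_eta, sorted_rev_eq_flatMap]
    have hnodup : (PySem.List.sorted (PySem.Set.ofList (events.map evKey)) (fun x => x) true).Nodup :=
      (PySem.List.sorted_perm _ _ _).symm.nodup (PySem.Set.nodup_ofList _)
    have hnonempty : ∀ d ∈ PySem.List.sorted (PySem.Set.ofList (events.map evKey)) (fun x => x) true,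
        grp events d ≠ [] := by
      intro d hd
      rw [PySem.List.mem_sorted, PySem.Set.mem_ofList] at hd
      obtain ⟨e, he, hk⟩ := List.mem_map.mp hd
      intro hnil
      have hmm : e ∈ grp events d :=
        List.mem_filter.mpr ⟨he, by simp only [beq_iff_eq]; exact hk⟩
      rw [hnil] at hmm
      simp at hmm
    have hkeys : ∀ d ∈ PySem.List.sorted (PySem.Set.ofList (events.map evKey)) (fun x => x) true,
        ∀ e ∈ grp events d, evKey e = d := fun d _ e he => grp_key events d e he
    rw [b_fold_groups (grp events) _ hnodup hnonempty hkeys none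
      (fun _ _ h => by simp at h) []]
    rw [List.nil_append]
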